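-- pv_equiv track=rewrite | github.com/kukiamarilla/public-procurements-outcome-predictor | scripts/etl/merge_and_download_pbcs.py | merge_by_tender_id
-- ===== SOURCE A (Python) =====
-- def merge_by_tender_id(layers: list[list[dict]]) -> list[dict]:
--     """Primera capa gana en claves; las siguientes solo rellenan huecos None."""
--     by_tid: dict[str, dict] = {}
--     for rows in layers:
--         for row in rows:
--             if not isinstance(row, dict):
--                 continue
--             tid = str(row.get("tenderId", "")).strip()
--             if not tid:
--                 continue
--             if tid not in by_tid:
--                 by_tid[tid] = dict(row)
--             else:
--                 base = by_tid[tid]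
--                 for k, v in row.items():
--                     if k not in base or base[k] is None:
--                         base[k] = v
--     return list(by_tid.values())
-- ===== SOURCE B (Python) =====
-- def merge_by_tender_id(layers: list[list[dict]]) -> list[dict]:
--     """Two-pass version: first group valid rows by tenderId (first-appearance
--     order), then merge each group with the same fill-only-holes rule."""
--     groups: dict[str, list[dict]] = {}
--     for rows in layers:
--         for row in rows:
--             if not isinstance(row, dict):
--                 continue
--             tid = str(row.get("tenderId", "")).strip()
--             if not tid:
--                 continue
--             groups.setdefault(tid, []).append(row)
--     out = []
--     for rowlist in groups.values():
--         merged = dict(rowlist[0])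
--         for row in rowlist[1:]:
--             for k, v in row.items():
--                 if k not in merged or merged[k] is None:
--                     merged[k] = v
--         out.append(merged)
--     return out
-- ===== Notes on version B (the rewrite author's own statement) =====
-- stated objective: alternative
-- what changed: Replaces the incremental merge-as-you-go dict of merged rows by a two-pass decomposition: first group valid rows into lists keyed by tenderId (setdefault/append, first-appearance order), then fold each group's tail into a copy of its head with the same fill-only-holes rule.
import Mathlib
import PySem

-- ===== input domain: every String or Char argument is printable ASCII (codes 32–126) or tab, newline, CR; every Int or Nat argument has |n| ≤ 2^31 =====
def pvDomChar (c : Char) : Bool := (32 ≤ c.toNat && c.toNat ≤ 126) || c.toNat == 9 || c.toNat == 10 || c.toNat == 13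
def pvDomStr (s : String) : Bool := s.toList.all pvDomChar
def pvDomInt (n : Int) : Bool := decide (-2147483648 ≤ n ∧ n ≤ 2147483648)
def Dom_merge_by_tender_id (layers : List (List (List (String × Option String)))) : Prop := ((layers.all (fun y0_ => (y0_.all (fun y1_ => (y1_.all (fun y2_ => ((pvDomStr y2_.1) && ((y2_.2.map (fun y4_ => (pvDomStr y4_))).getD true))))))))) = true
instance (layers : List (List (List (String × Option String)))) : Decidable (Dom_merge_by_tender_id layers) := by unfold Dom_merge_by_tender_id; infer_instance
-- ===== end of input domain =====

-- B replaces A's merge-as-you-go dict of merged rows by a two-pass group-then-merge decomposition (same cost; 'alternative').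


-- ===== PORT A =====
-- shared helper: tid = str(row.get("tenderId", "")).strip()  (str(None) = "None")
def pvTid (row : List (String × Option String)) : String :=
  PySem.Str.strip (match (PySem.Dict.mk row).get? "tenderId" with
    | none => ""
    | some none => "None"
    | some (some s) => s)

-- shared helper: for k, v in row.items(): if k not in base or base[k] is None: base[k] = v
def pvFill (base : PySem.Dict String (Option String)) (row : List (String × Option String)) :
    PySem.Dict String (Option String) :=
  row.foldl (fun b kv =>
    if !b.contains kv.1 || b.get? kv.1 == some (none : Option String) then b.insert kv.1 kv.2 else b) base

-- literal port of A (the 'isinstance(row, dict)' guard is always true on this type)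
def merge_by_tender_id (layers : List (List (List (String × Option String)))) :
    List (List (String × Option String)) :=
  (layers.foldl (fun by_tid rows =>
      rows.foldl (fun by_tid row =>
        let tid := pvTid row
        if tid = "" then by_tid
        else
          match by_tid.get? tid with
          | none => by_tid.insert tid (PySem.Dict.mk row)        -- by_tid[tid] = dict(row)
          | some base => by_tid.insert tid (pvFill base row))    -- in-place fill of base
        by_tid)
    (PySem.Dict.mk [])).values.map PySem.Dict.items

-- ===== PORT B =====
-- merged = dict(rowlist[0]); fold the fill rule over rowlist[1:]
def pvMergeGroup (rs : List (List (String × Option String))) : PySem.Dict String (Option String) :=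
  match rs with
  | [] => PySem.Dict.mk []
  | r0 :: rest => rest.foldl pvFill (PySem.Dict.mk r0)

def merge_by_tender_id_alt (layers : List (List (List (String × Option String)))) :
    List (List (String × Option String)) :=
  ((layers.foldl (fun groups rows =>
      rows.foldl (fun groups row =>
        let tid := pvTid row
        if tid = "" then groups
        else groups.modify tid [] (· ++ [row]))   -- groups.setdefault(tid, []).append(row)
        groups)
    (PySem.Dict.mk [])).values).map (fun rowlist => (pvMergeGroup rowlist).items)

-- ===== PRECONDITION & SPEC =====
def Spec_merge_by_tender_id (layers : List (List (List (String × Option String)))) (out : List (List (String × Option String))) : Prop := out = merge_by_tender_id_alt layers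
instance (layers : List (List (List (String × Option String)))) (out : List (List (String × Option String))) : Decidable (Spec_merge_by_tender_id layers out) := by unfold Spec_merge_by_tender_id; infer_instance

-- ===== CLAIM (what is proved, stated in full; the proofs are below) =====
def Claim_equal_merge_by_tender_id : Prop := ∀ (layers : List (List (List (String × Option String)))), Dom_merge_by_tender_id layers → Spec_merge_by_tender_id layers (merge_by_tender_id layers)

-- ===== LEMMAS AND PROOFS =====

-- the coupling invariant between A's dict of merged rows and B's dict of groups
def pvInv (d : PySem.Dict String (PySem.Dict String (Option String)))
    (g : PySem.Dict String (List (List (String × Option String)))) : Prop :=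
  d.items = g.items.map (fun p => (p.1, pvMergeGroup p.2)) ∧
  (∀ p ∈ g.items, p.2 ≠ []) ∧ g.keys.Nodup

theorem pvMergeGroup_snoc (rs : List (List (String × Option String))) (r : List (String × Option String))
    (h : rs ≠ []) : pvMergeGroup (rs ++ [r]) = pvFill (pvMergeGroup rs) r := by
  cases rs with
  | nil => exact absurd rfl h
  | cons r0 rest => simp [pvMergeGroup, List.foldl_append]

theorem pvInv_step (d : PySem.Dict String (PySem.Dict String (Option String)))
    (g : PySem.Dict String (List (List (String × Option String))))
    (row : List (String × Option String)) (h : pvInv d g) :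
    pvInv ((if pvTid row = "" then d
        else match d.get? (pvTid row) with
          | none => d.insert (pvTid row) (PySem.Dict.mk row)
          | some base => d.insert (pvTid row) (pvFill base row)))
      (if pvTid row = "" then g else g.modify (pvTid row) [] (· ++ [row])) := by
  obtain ⟨hitems, hne, hnd⟩ := h
  by_cases ht : pvTid row = ""
  · simpa [ht] using ⟨hitems, hne, hnd⟩
  set t := pvTid row with htdef
  simp only [if_neg ht]
  have hget : d.get? t = (g.get? t).map (fun rs => pvMergeGroup rs) := by
    simp only [PySem.Dict.get?, hitems, List.find?_map]
    have hpr : ((fun p : String × PySem.Dict String (Option String) => p.1 == t) ∘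
        (fun p : String × List (List (String × Option String)) => (p.1, pvMergeGroup p.2))) =
        (fun p => p.1 == t) := rfl
    rw [hpr]
    cases List.find? (fun p => p.1 == t) g.items <;> simp
  have hcont : d.contains t = g.contains t := by
    simp only [PySem.Dict.contains, hitems, List.any_map]
    rfl
  cases hfound : g.get? t with
  | none =>
    have hgc : g.contains t = false := by
      rw [PySem.Dict.contains_eq_isSome_get?, hfound]; rfl
    have hdc : d.contains t = false := by rw [hcont]; exact hgc
    have hd : d.get? t = none := by simp [hget, hfound]
    rw [hd]
    refine ⟨?_, ?_, ?_⟩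
    · show (d.insert t (PySem.Dict.mk row)).items = _
      rw [PySem.Dict.modify, PySem.Dict.getD_of_not_contains g [] hgc,
        PySem.Dict.items_insert_of_not_contains g _ hgc,
        PySem.Dict.items_insert_of_not_contains d _ hdc]
      simp [hitems, pvMergeGroup]
    · intro p hp
      rw [PySem.Dict.modify, PySem.Dict.getD_of_not_contains g [] hgc,
        PySem.Dict.items_insert_of_not_contains g _ hgc] at hp
      rcases List.mem_append.1 hp with h1 | h1
      · exact hne p h1
      · simp at h1; simp [h1]
    · rw [PySem.Dict.modify]
      exact PySem.Dict.nodup_keys_insert _ _ _ hnd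
  | some rs =>
    have hgc : g.contains t = true := by
      rw [PySem.Dict.contains_eq_isSome_get?, hfound]; rfl
    have hdc : d.contains t = true := by rw [hcont]; exact hgc
    have hd : d.get? t = some (pvMergeGroup rs) := by simp [hget, hfound]
    rw [hd]
    have hrsne : rs ≠ [] := hne _ (PySem.Dict.mem_items_of_get?_eq_some g hfound)
    have hgetDrs : g.getD t [] = rs := PySem.Dict.getD_of_get?_eq_some g [] hfound
    refine ⟨?_, ?_, ?_⟩
    · show (d.insert t (pvFill (pvMergeGroup rs) row)).items = _
      rw [PySem.Dict.modify, hgetDrs, PySem.Dict.items_insert_of_contains g _ hgc,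
        PySem.Dict.items_insert_of_contains d _ hdc, hitems, List.map_map, List.map_map]
      refine List.map_congr_left (fun q hq => ?_)
      by_cases hq1 : (q.1 == t) = true
      · have hq2 : q.2 = rs := by
          have hqt : q.1 = t := by simpa using hq1
          have := PySem.Dict.get?_of_mem_items g (k := q.1) (v := q.2) (by simpa using hq) hnd
          rw [hqt, hfound] at this
          simpa using this.symm
        simp [Function.comp, hq1, pvMergeGroup_snoc rs row hrsne]
      · simp [Function.comp, hq1]
    · intro p hp
      rw [PySem.Dict.modify, hgetDrs, PySem.Dict.items_insert_of_contains g _ hgc] at hp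
      rcases List.mem_map.1 hp with ⟨q, hq, hqeq⟩
      by_cases hq1 : (q.1 == t) = true
      · rw [if_pos hq1] at hqeq; subst hqeq; simp [hrsne]
      · rw [if_neg (by simpa using hq1)] at hqeq; subst hqeq; exact hne q hq
    · rw [PySem.Dict.modify]
      exact PySem.Dict.nodup_keys_insert _ _ _ hnd

theorem pvInv_foldl {α : Type}
    (fA : PySem.Dict String (PySem.Dict String (Option String)) → α → PySem.Dict String (PySem.Dict String (Option String)))
    (fB : PySem.Dict String (List (List (String × Option String))) → α → PySem.Dict String (List (List (String × Option String))))
    (hstep : ∀ d g a, pvInv d g → pvInv (fA d a) (fB g a)) :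
    ∀ (l : List α) d g, pvInv d g → pvInv (l.foldl fA d) (l.foldl fB g) := by
  intro l
  induction l with
  | nil => intro d g h; simpa using h
  | cons a l ih => intro d g h; exact ih _ _ (hstep d g a h)

-- ===== VERDICT (by name: the statement is the Claim_ definition above) =====
theorem merge_by_tender_id_spec : Claim_equal_merge_by_tender_id := by
  intro layers _
  show merge_by_tender_id layers = merge_by_tender_id_alt layers
  unfold merge_by_tender_id merge_by_tender_id_alt
  have hinner := pvInv_foldl
    (fun by_tid row =>
      let tid := pvTid row
      if tid = "" then by_tid
      else match by_tid.get? tid with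
        | none => by_tid.insert tid (PySem.Dict.mk row)
        | some base => by_tid.insert tid (pvFill base row))
    (fun groups row =>
      let tid := pvTid row
      if tid = "" then groups
      else groups.modify tid [] (· ++ [row]))
    (fun d g row h => pvInv_step d g row h)
  have h := pvInv_foldl
    (fun d (rows : List (List (String × Option String))) => rows.foldl _ d)
    (fun g (rows : List (List (String × Option String))) => rows.foldl _ g)
    (fun d g rows h => hinner rows d g h) layers (PySem.Dict.mk []) (PySem.Dict.mk [])
    ⟨by simp, by simp, by simp [PySem.Dict.keys]⟩
  obtain ⟨hitems, -, -⟩ := h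
  simp only [PySem.Dict.values, hitems, List.map_map]
  rfl
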